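-- pv_equiv track=rewrite | github.com/GizawAAiT/Competitive_programming | codeforces/C_White_Black_Balanced_Subtrees.py | count
-- ===== SOURCE A (Python) =====
-- def count(root, memo, dic, s):
--     if root not in dic:
--         return [0, 0]
--     if root not in memo:
--         result = [0, 0]
--         if s[root] == 'W':
--             result[0] += 1
--         else:
--             result[1] += 1
--         for child in dic[root]:
--             one, two = count(child, memo, dic, s)
--             result[0] += one
--             result[1] += two
--         memo[root] = result
--     return memo[root]
-- ===== SOURCE B (Python) =====
-- def count(root, memo, dic, s):
--     if root not in dic:
--         return [0, 0]
--     table = {}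
--     visited = set()
--     stack = [(root, False)]
--     while stack:
--         node, ready = stack.pop()
--         if not ready:
--             if node in visited:
--                 continue
--             visited.add(node)
--             if node in memo:
--                 table[node] = memo[node]
--                 continue
--             stack.append((node, True))
--             for c in dic[node]:
--                 if c in dic:
--                     stack.append((c, False))
--         else:
--             w = 1 if s[node] == 'W' else 0
--             b = 1 - w
--             for c in dic[node]:
--                 if c in dic:
--                     cw, cb = table[c]
--                     w += cw
--                     b += cb
--             table[node] = [w, b]
--     return table[root]
-- ===== Notes on version B (the rewrite author's own statement) =====
-- stated objective: alternative
-- what changed: Replaces the memoized top-down recursive DFS (which mutates memo in place) with a non-recursive iterative post-order traversal: an explicit stack of (node, ready) frames plus a visited set and a separate result table, reading memo but never mutating it; equivalence is about the return value only.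
import Mathlib
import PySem

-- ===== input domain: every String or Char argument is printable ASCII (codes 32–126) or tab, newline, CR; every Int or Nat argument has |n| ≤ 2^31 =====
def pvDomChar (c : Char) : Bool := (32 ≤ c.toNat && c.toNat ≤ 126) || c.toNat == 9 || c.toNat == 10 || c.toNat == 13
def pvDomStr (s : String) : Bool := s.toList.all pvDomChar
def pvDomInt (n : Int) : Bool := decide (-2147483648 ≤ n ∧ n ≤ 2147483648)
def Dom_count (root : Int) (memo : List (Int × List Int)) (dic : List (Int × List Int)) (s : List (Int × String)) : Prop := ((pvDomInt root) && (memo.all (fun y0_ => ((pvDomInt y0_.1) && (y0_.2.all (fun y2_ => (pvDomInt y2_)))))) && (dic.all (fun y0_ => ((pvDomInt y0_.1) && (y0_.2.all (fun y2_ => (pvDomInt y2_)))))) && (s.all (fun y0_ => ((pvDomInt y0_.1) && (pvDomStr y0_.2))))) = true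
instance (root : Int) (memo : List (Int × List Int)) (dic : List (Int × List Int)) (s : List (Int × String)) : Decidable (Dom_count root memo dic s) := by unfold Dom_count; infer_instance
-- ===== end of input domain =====

-- B replaces the memoized recursive DFS by an iterative explicit-stack post-order pass; A mutates memo in
-- place (fills subtree results for descendants), B does not — the equivalence is about the RETURN value only.

-- ===== PORT A =====
-- memoized recursive DFS; fuel bounds the recursion depth (dic.length + 1 suffices under Pre_count,
-- where the memo-miss part of dic reachable from root is acyclic)
def countGo (dic : List (Int × List Int)) (s : List (Int × String)) :
    Nat → Int → PySem.Dict Int (List Int) → List Int × PySem.Dict Int (List Int)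
  | 0, _, memo => ([0, 0], memo)
  | fuel + 1, root, memo =>
    match PySem.Dict.get? (PySem.Dict.mk dic) root with
    | none => ([0, 0], memo)
    | some children =>
      match memo.get? root with
      | some v => (v, memo)
      | none =>
        let r0 : Int × Int :=
          if (PySem.Dict.get? (PySem.Dict.mk s) root).getD "" == "W" then (1, 0) else (0, 1)
        let st := children.foldl
          (fun (acc : (Int × Int) × PySem.Dict Int (List Int)) child =>
            let r := countGo dic s fuel child acc.2
            match r.1 with
            | [one, two] => ((acc.1.1 + one, acc.1.2 + two), r.2)
            | _ => (acc.1, r.2))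
          (r0, memo)
        let result := [st.1.1, st.1.2]
        (result, st.2.insert root result)

def count (root : Int) (memo : List (Int × List Int)) (dic : List (Int × List Int)) (s : List (Int × String)) : List Int :=
  (countGo dic s (dic.length + 1) root (PySem.Dict.mk memo)).1

-- ===== PORT B =====
-- one step of B's explicit-stack machine: pop a (node, ready) frame
def loopB (memo : PySem.Dict Int (List Int)) (dic : PySem.Dict Int (List Int)) (s : PySem.Dict Int String) :
    Nat → List (Int × Bool) → PySem.Set Int → PySem.Dict Int (List Int) → PySem.Dict Int (List Int)
  | 0, _, _, table => table
  | fuel + 1, stack, visited, table =>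
    match stack with
    | [] => table
    | (node, ready) :: rest =>
      if ready = false then
        if PySem.Set.contains visited node then
          loopB memo dic s fuel rest visited table
        else
          let visited' := PySem.Set.add visited node
          if (memo.get? node).isSome then
            loopB memo dic s fuel rest visited' (table.insert node (memo.getD node []))
          else
            loopB memo dic s fuel
              ((dic.getD node []).foldl
                (fun (st : List (Int × Bool)) c =>
                  if (dic.get? c).isSome then (c, false) :: st else st)
                ((node, true) :: rest))
              visited' table
      else
        let w0 : Int := if (s.get? node).getD "" == "W" then 1 else 0
        let wb := (dic.getD node []).foldl
          (fun (acc : Int × Int) c =>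
            if ((dic.get? c)).isSome then
              match table.get? c with
              | some [cw, cb] => (acc.1 + cw, acc.2 + cb)
              | _ => acc
            else acc)
          (w0, 1 - w0)
        loopB memo dic s fuel rest visited (table.insert node [wb.1, wb.2])

def count_alt (root : Int) (memo : List (Int × List Int)) (dic : List (Int × List Int)) (s : List (Int × String)) : List Int :=
  if (PySem.Dict.get? (PySem.Dict.mk dic) root).isNone then [0, 0]
  else
    (loopB (PySem.Dict.mk memo) (PySem.Dict.mk dic) (PySem.Dict.mk s)
        ((2 + (dic.map (fun q => q.2.length)).sum) ^ (dic.length + 1))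
        [(root, false)] PySem.Set.empty PySem.Dict.empty).getD root []

-- ===== PRECONDITION & SPEC =====

-- x is a key of dic (first-match association-list semantics, as Python's 'x in dic')
def isKeyB (dic : List (Int × List Int)) (x : Int) : Bool :=
  (PySem.Dict.get? (PySem.Dict.mk dic) x).isSome

-- x is a key of dic with no initial memo entry: exactly the nodes A expands (reads s, recurses)
def missB (memo dic : List (Int × List Int)) (x : Int) : Bool :=
  isKeyB dic x && (PySem.Dict.get? (PySem.Dict.mk memo) x).isNone

-- the dic-key children A recurses into from x (none unless x is an expanded node)
def kidsK (memo dic : List (Int × List Int)) (x : Int) : Finset Int :=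
  if missB memo dic x then
    ((PySem.Dict.getD (PySem.Dict.mk dic) x []).filter (fun c => isKeyB dic c)).toFinset
  else ∅

def stepV (memo dic : List (Int × List Int)) (S : Finset Int) : Finset Int :=
  S ∪ S.biUnion (kidsK memo dic)

-- dic keys reachable from x through memo-miss keys (dic.length + 1 iterations reach the fixpoint)
def reachV (memo dic : List (Int × List Int)) (x : Int) : Finset Int :=
  (stepV memo dic)^[dic.length + 1] {x}

-- Pre_count holds exactly when the Python A returns: it excludes only the inputs where A raises —
-- an expanded node without a colour in s (KeyError), an initial memo entry of length ≠ 2 unpacked for a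
-- dic-key child of an expanded node (ValueError), or a cycle among memo-miss dic keys reachable from
-- root (RecursionError).  No input on which A returns a value is excluded.
def Pre_count (root : Int) (memo : List (Int × List Int)) (dic : List (Int × List Int)) (s : List (Int × String)) : Prop :=
  ∀ x ∈ reachV memo dic root, missB memo dic x = true →
    ((PySem.Dict.get? (PySem.Dict.mk s) x).isSome = true
      ∧ ∀ c ∈ PySem.Dict.getD (PySem.Dict.mk dic) x [], isKeyB dic c = true →
          ((∀ v, PySem.Dict.get? (PySem.Dict.mk memo) c = some v → v.length = 2)
            ∧ x ∉ reachV memo dic c))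
instance (root : Int) (memo : List (Int × List Int)) (dic : List (Int × List Int)) (s : List (Int × String)) : Decidable (Pre_count root memo dic s) := by unfold Pre_count; infer_instance

def pvWitness_count : Int × (List (Int × List Int)) × (List (Int × List Int)) × (List (Int × String)) :=
  (1, [], [(1, [2]), (2, [])], [(1, "W"), (2, "B")])

def Spec_count (root : Int) (memo : List (Int × List Int)) (dic : List (Int × List Int)) (s : List (Int × String)) (out : List Int) : Prop := out = count_alt root memo dic s
instance (root : Int) (memo : List (Int × List Int)) (dic : List (Int × List Int)) (s : List (Int × String)) (out : List Int) : Decidable (Spec_count root memo dic s out) := by unfold Spec_count; infer_instance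

-- ===== CLAIM (what is proved, stated in full; the proofs are below) =====
def Claim_equal_count : Prop := ∀ (root : Int) (memo : List (Int × List Int)) (dic : List (Int × List Int)) (s : List (Int × String)), Dom_count root memo dic s → Pre_count root memo dic s → Spec_count root memo dic s (count root memo dic s)

-- ===== LEMMAS AND PROOFS =====

-- number of nodes reachable from x through memo-miss keys: the termination measure of both ports
def rkV (memo dic : List (Int × List Int)) (x : Int) : Nat := (reachV memo dic x).card

-- shared fold over a children list: add the pair held for each dic-key child (skip other shapes)
def cfoldO (dic : PySem.Dict Int (List Int)) (g : Int → Option (List Int)) (cs : List Int) (acc : Int × Int) : Int × Int :=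
  cs.foldl (fun (acc : Int × Int) c =>
    if (dic.get? c).isSome then
      match g c with
      | some [cw, cb] => (acc.1 + cw, acc.2 + cb)
      | _ => acc
    else acc) acc

-- fuel-indexed denotation of the computation both ports perform
def valF (memo dic : PySem.Dict Int (List Int)) (s : PySem.Dict Int String) : Nat → Int → List Int
  | 0, _ => [0, 0]
  | f + 1, x =>
    match dic.get? x with
    | none => [0, 0]
    | some _ =>
      match memo.get? x with
      | some v => v
      | none =>
        let w0 : Int := if (s.get? x).getD "" == "W" then 1 else 0
        let wb := cfoldO dic (fun c => some (valF memo dic s f c)) (dic.getD x []) (w0, 1 - w0)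
        [wb.1, wb.2]

def VAL (memo dic : List (Int × List Int)) (s : List (Int × String)) (x : Int) : List Int :=
  valF (PySem.Dict.mk memo) (PySem.Dict.mk dic) (PySem.Dict.mk s) (rkV memo dic x) x

def keysF (dic : List (Int × List Int)) : Finset Int := (dic.map Prod.fst).toFinset

theorem isKey_mem_keysF (dic : List (Int × List Int)) (x : Int)
    (h : isKeyB dic x = true) : x ∈ keysF dic := by
  unfold isKeyB at h
  obtain ⟨cs, hcs⟩ := Option.isSome_iff_exists.mp h
  have hm := PySem.Dict.mem_items_of_get?_eq_some (PySem.Dict.mk dic) hcs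
  have : (x, cs) ∈ dic := by simpa [PySem.Dict.mk] using hm
  simp [keysF, List.mem_map]
  exact ⟨cs, this⟩

theorem kidsK_sub_keysF (memo dic : List (Int × List Int)) (x : Int) :
    kidsK memo dic x ⊆ keysF dic := by
  unfold kidsK
  split
  · intro c hc
    rw [List.mem_toFinset, List.mem_filter] at hc
    exact isKey_mem_keysF dic c hc.2
  · simp

theorem subset_stepV (memo dic : List (Int × List Int)) (S : Finset Int) : S ⊆ stepV memo dic S := by
  unfold stepV; exact Finset.subset_union_left

theorem iter_subset_bound (memo dic : List (Int × List Int)) (x : Int) :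
    ∀ n, (stepV memo dic)^[n] {x} ⊆ insert x (keysF dic) := by
  intro n
  induction n with
  | zero => simp
  | succ n ih =>
    rw [Function.iterate_succ_apply']
    unfold stepV
    apply Finset.union_subset ih
    intro c hc
    rw [Finset.mem_biUnion] at hc
    obtain ⟨y, _, hcy⟩ := hc
    exact Finset.mem_insert_of_mem (kidsK_sub_keysF memo dic y hcy)

theorem iter_grow (memo dic : List (Int × List Int)) (x : Int) (n : Nat) :
    (stepV memo dic)^[n] {x} ⊆ (stepV memo dic)^[n + 1] {x} := by
  rw [Function.iterate_succ_apply']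
  exact subset_stepV memo dic _

theorem iter_stab (memo dic : List (Int × List Int)) (x : Int) (m : Nat)
    (h : (stepV memo dic)^[m + 1] {x} = (stepV memo dic)^[m] {x}) :
    ∀ n, m ≤ n → (stepV memo dic)^[n] {x} = (stepV memo dic)^[m] {x} := by
  intro n
  induction n with
  | zero => intro h0; rw [Nat.le_zero.mp h0]
  | succ n ih =>
    intro hmn
    rcases Nat.lt_or_ge m (n + 1) with hlt | hge
    · have hmn' : m ≤ n := by omega
      rw [Function.iterate_succ_apply', ih hmn',
        ← Function.iterate_succ_apply' (stepV memo dic) m ({x} : Finset Int)]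
      exact h
    · have : m = n + 1 := by omega
      rw [this]

theorem iter_card_grow (memo dic : List (Int × List Int)) (x : Int) :
    ∀ n, (∀ m, m < n → (stepV memo dic)^[m + 1] {x} ≠ (stepV memo dic)^[m] {x}) →
      n + 1 ≤ ((stepV memo dic)^[n] {x}).card := by
  intro n
  induction n with
  | zero => intro _; simp
  | succ n ih =>
    intro h
    have h1 := ih (fun m hm => h m (by omega))
    have hne := h n (by omega)
    have hsub := iter_grow memo dic x n
    have hss : (stepV memo dic)^[n] {x} ⊂ (stepV memo dic)^[n + 1] {x} :=
      ⟨hsub, fun hrev => hne (Finset.Subset.antisymm (by simpa using hrev) hsub)⟩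
    have := Finset.card_lt_card hss
    omega

theorem reachV_fix (memo dic : List (Int × List Int)) (x : Int) :
    stepV memo dic (reachV memo dic x) = reachV memo dic x := by
  by_cases hex : ∃ m, m < dic.length + 1 ∧
      (stepV memo dic)^[m + 1] {x} = (stepV memo dic)^[m] {x}
  · obtain ⟨m, hm, he⟩ := hex
    have h1 := iter_stab memo dic x m he (dic.length + 1) (by omega)
    have h2 := iter_stab memo dic x m he (dic.length + 2) (by omega)
    unfold reachV
    rw [← Function.iterate_succ_apply' (stepV memo dic) (dic.length + 1) ({x} : Finset Int)]
    show (stepV memo dic)^[dic.length + 1 + 1] {x} = (stepV memo dic)^[dic.length + 1] {x}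
    rw [h1]
    exact h2
  · push_neg at hex
    exfalso
    have hg := iter_card_grow memo dic x (dic.length + 1) (fun m hm => hex m hm)
    have hb := Finset.card_le_card (iter_subset_bound memo dic x (dic.length + 1))
    have hins : (insert x (keysF dic)).card ≤ (keysF dic).card + 1 := Finset.card_insert_le _ _
    have hk : (keysF dic).card ≤ dic.length := by
      unfold keysF
      exact le_trans (List.toFinset_card_le _) (by simp)
    omega

theorem mem_reachV_self (memo dic : List (Int × List Int)) (x : Int) : x ∈ reachV memo dic x := by
  unfold reachV
  have : ({x} : Finset Int) ⊆ (stepV memo dic)^[dic.length + 1] {x} := by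
    induction (dic.length + 1) with
    | zero => simp
    | succ n ih =>
      rw [Function.iterate_succ_apply']
      exact Finset.Subset.trans ih (subset_stepV memo dic _)
  simpa using this

theorem reachV_closed (memo dic : List (Int × List Int)) (x y : Int)
    (hy : y ∈ reachV memo dic x) : kidsK memo dic y ⊆ reachV memo dic x := by
  intro c hc
  have := reachV_fix memo dic x
  rw [← this]
  unfold stepV
  rw [Finset.mem_union, Finset.mem_biUnion]
  exact Or.inr ⟨y, hy, hc⟩

theorem reachV_least (memo dic : List (Int × List Int)) (x : Int) (T : Finset Int)
    (hx : x ∈ T) (hcl : ∀ y ∈ T, kidsK memo dic y ⊆ T) : reachV memo dic x ⊆ T := by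
  unfold reachV
  induction (dic.length + 1) with
  | zero => simpa using hx
  | succ n ih =>
    rw [Function.iterate_succ_apply']
    unfold stepV
    apply Finset.union_subset ih
    intro c hc
    rw [Finset.mem_biUnion] at hc
    obtain ⟨y, hy, hcy⟩ := hc
    exact hcl y (ih hy) hcy

theorem reachV_kid_subset (memo dic : List (Int × List Int)) (x c : Int)
    (hc : c ∈ kidsK memo dic x) : reachV memo dic c ⊆ reachV memo dic x := by
  apply reachV_least
  · exact reachV_closed memo dic x x (mem_reachV_self memo dic x) hc
  · exact fun y hy => reachV_closed memo dic x y hy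

theorem rkV_pos (memo dic : List (Int × List Int)) (x : Int) : 1 ≤ rkV memo dic x :=
  Finset.card_pos.mpr ⟨x, mem_reachV_self memo dic x⟩

theorem rkV_le (memo dic : List (Int × List Int)) (x : Int) : rkV memo dic x ≤ dic.length + 1 := by
  have hb := Finset.card_le_card (iter_subset_bound memo dic x (dic.length + 1))
  have hins : (insert x (keysF dic)).card ≤ (keysF dic).card + 1 := Finset.card_insert_le _ _
  have hk : (keysF dic).card ≤ dic.length := by
    unfold keysF
    exact le_trans (List.toFinset_card_le _) (by simp)
  unfold rkV reachV
  omega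

theorem mem_kidsK (memo dic : List (Int × List Int)) (x c : Int)
    (hm : missB memo dic x = true) (hc : c ∈ PySem.Dict.getD (PySem.Dict.mk dic) x [])
    (hk : isKeyB dic c = true) : c ∈ kidsK memo dic x := by
  unfold kidsK
  rw [if_pos hm, List.mem_toFinset, List.mem_filter]
  exact ⟨hc, hk⟩

-- the acyclicity part of Pre_count, as the hypothesis the lemmas below thread
def AcycH (root : Int) (memo dic : List (Int × List Int)) : Prop :=
  ∀ x ∈ reachV memo dic root, missB memo dic x = true →
    ∀ c ∈ PySem.Dict.getD (PySem.Dict.mk dic) x [], isKeyB dic c = true →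
      x ∉ reachV memo dic c

theorem rk_child_lt (root : Int) (memo dic : List (Int × List Int)) (hA : AcycH root memo dic)
    (x c : Int) (hx : x ∈ reachV memo dic root) (hm : missB memo dic x = true)
    (hc : c ∈ PySem.Dict.getD (PySem.Dict.mk dic) x []) (hk : isKeyB dic c = true) :
    rkV memo dic c < rkV memo dic x := by
  have hkid := mem_kidsK memo dic x c hm hc hk
  have hsub := reachV_kid_subset memo dic x c hkid
  have hxin := mem_reachV_self memo dic x
  have hxni := hA x hx hm c hc hk
  exact Finset.card_lt_card ⟨hsub, fun hrev => hxni (hrev hxin)⟩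

theorem kid_mem_V (root : Int) (memo dic : List (Int × List Int))
    (x c : Int) (hx : x ∈ reachV memo dic root) (hm : missB memo dic x = true)
    (hc : c ∈ PySem.Dict.getD (PySem.Dict.mk dic) x []) (hk : isKeyB dic c = true) :
    c ∈ reachV memo dic root :=
  reachV_closed memo dic root x hx (mem_kidsK memo dic x c hm hc hk)

theorem cfoldO_congr (dic : PySem.Dict Int (List Int)) (g g' : Int → Option (List Int))
    (cs : List Int) (h : ∀ c ∈ cs, (dic.get? c).isSome = true → g c = g' c) :
    ∀ acc, cfoldO dic g cs acc = cfoldO dic g' cs acc := by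
  induction cs with
  | nil => intro acc; rfl
  | cons c rest ih =>
    intro acc
    unfold cfoldO
    simp only [List.foldl_cons]
    by_cases hg : (dic.get? c).isSome = true
    · rw [h c (by simp) hg]
      exact ih (fun d hd hgd => h d (by simp [hd]) hgd) _
    · have hg' : ((dic.get? c).isSome = true) = False := by simp [hg]
      simp only [hg', if_false]
      exact ih (fun d hd hgd => h d (by simp [hd]) hgd) _

theorem valF_stable (root : Int) (memo dic : List (Int × List Int)) (s : List (Int × String))
    (hA : AcycH root memo dic) :
    ∀ (f g : Nat) (x : Int), x ∈ reachV memo dic root →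
      rkV memo dic x ≤ f → rkV memo dic x ≤ g →
      valF (PySem.Dict.mk memo) (PySem.Dict.mk dic) (PySem.Dict.mk s) f x
        = valF (PySem.Dict.mk memo) (PySem.Dict.mk dic) (PySem.Dict.mk s) g x := by
  intro f
  induction f with
  | zero =>
    intro g x _ hf _
    exact absurd (rkV_pos memo dic x) (by omega)
  | succ f ih =>
    intro g x hx hf hg
    obtain ⟨g', rfl⟩ : ∃ g', g = g' + 1 := ⟨g - 1, by have := rkV_pos memo dic x; omega⟩
    show valF _ _ _ (f + 1) x = valF _ _ _ (g' + 1) x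
    unfold valF
    cases hdx : PySem.Dict.get? (PySem.Dict.mk dic) x with
    | none => rfl
    | some cs =>
      cases hmx : PySem.Dict.get? (PySem.Dict.mk memo) x with
      | some v => rfl
      | none =>
        have hmiss : missB memo dic x = true := by
          unfold missB isKeyB
          simp [hdx, hmx]
        have hcong := cfoldO_congr (PySem.Dict.mk dic)
          (fun c => some (valF (PySem.Dict.mk memo) (PySem.Dict.mk dic) (PySem.Dict.mk s) f c))
          (fun c => some (valF (PySem.Dict.mk memo) (PySem.Dict.mk dic) (PySem.Dict.mk s) g' c))
          (PySem.Dict.getD (PySem.Dict.mk dic) x [])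
          (by
            intro c hc hk
            have hlt := rk_child_lt root memo dic hA x c hx hmiss hc hk
            have hcv := kid_mem_V root memo dic x c hx hmiss hc hk
            have := ih g' c hcv (by omega) (by omega)
            simp [this])
        simp only [hcong]

theorem VAL_memoHit (memo dic : List (Int × List Int)) (s : List (Int × String)) (x : Int)
    (hk : isKeyB dic x = true) (v : List Int)
    (hv : PySem.Dict.get? (PySem.Dict.mk memo) x = some v) : VAL memo dic s x = v := by
  obtain ⟨r, hr⟩ : ∃ r, rkV memo dic x = r + 1 :=
    ⟨rkV memo dic x - 1, by have := rkV_pos memo dic x; omega⟩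
  obtain ⟨cs, hcs⟩ := Option.isSome_iff_exists.mp hk
  unfold VAL
  rw [hr]
  unfold valF
  rw [hcs, hv]

theorem VAL_miss (root : Int) (memo dic : List (Int × List Int)) (s : List (Int × String))
    (hA : AcycH root memo dic) (x : Int) (hx : x ∈ reachV memo dic root)
    (cs : List Int) (hcs : PySem.Dict.get? (PySem.Dict.mk dic) x = some cs)
    (hmx : PySem.Dict.get? (PySem.Dict.mk memo) x = none) :
    VAL memo dic s x =
      [(cfoldO (PySem.Dict.mk dic) (fun c => some (VAL memo dic s c)) cs
          ((if (PySem.Dict.get? (PySem.Dict.mk s) x).getD "" == "W" then (1 : Int) else 0),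
            1 - (if (PySem.Dict.get? (PySem.Dict.mk s) x).getD "" == "W" then (1 : Int) else 0))).1,
        (cfoldO (PySem.Dict.mk dic) (fun c => some (VAL memo dic s c)) cs
          ((if (PySem.Dict.get? (PySem.Dict.mk s) x).getD "" == "W" then (1 : Int) else 0),
            1 - (if (PySem.Dict.get? (PySem.Dict.mk s) x).getD "" == "W" then (1 : Int) else 0))).2] := by
  have hmiss : missB memo dic x = true := by
    unfold missB isKeyB
    simp [hcs, hmx]
  obtain ⟨r, hr⟩ : ∃ r, rkV memo dic x = r + 1 :=
    ⟨rkV memo dic x - 1, by have := rkV_pos memo dic x; omega⟩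
  have hcong := cfoldO_congr (PySem.Dict.mk dic)
    (fun c => some (valF (PySem.Dict.mk memo) (PySem.Dict.mk dic) (PySem.Dict.mk s) r c))
    (fun c => some (VAL memo dic s c)) cs
    (by
      intro c hc hk
      have hc' : c ∈ PySem.Dict.getD (PySem.Dict.mk dic) x [] := by
        rw [PySem.Dict.getD_of_get?_eq_some _ [] hcs]; exact hc
      have hlt := rk_child_lt root memo dic hA x c hx hmiss hc' hk
      have hcv := kid_mem_V root memo dic x c hx hmiss hc' hk
      have := valF_stable root memo dic s hA r (rkV memo dic c) c hcv (by omega) (by omega)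
      simp [VAL, this])
  unfold VAL
  rw [hr]
  simp only [valF, hcs, hmx, PySem.Dict.getD_of_get?_eq_some _ [] hcs, hcong]
  simp [VAL]

theorem countGo_nonkey (dic : List (Int × List Int)) (s : List (Int × String))
    (f : Nat) (c : Int) (m : PySem.Dict Int (List Int))
    (h : isKeyB dic c = false) : countGo dic s f c m = ([0, 0], m) := by
  have hn : PySem.Dict.get? (PySem.Dict.mk dic) c = none := by
    unfold isKeyB at h
    exact Option.not_isSome_iff_eq_none.mp (by simp [h])
  cases f with
  | zero => rfl
  | succ f => simp [countGo, hn]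

theorem matchSomePair (l : List Int) (acc : Int × Int) :
    (match some l with
      | some [cw, cb] => (acc.1 + cw, acc.2 + cb)
      | _ => acc)
    = (match l with
      | [cw, cb] => (acc.1 + cw, acc.2 + cb)
      | _ => acc) := by
  rcases l with _ | ⟨a, _ | ⟨b, _ | ⟨e, t⟩⟩⟩ <;> rfl

theorem foldA_cons (dic : List (Int × List Int)) (s : List (Int × String)) (fuel : Nat)
    (c : Int) (rest : List Int) (acc : Int × Int) (m' : PySem.Dict Int (List Int)) :
    ((c :: rest).foldl
        (fun (acc : (Int × Int) × PySem.Dict Int (List Int)) child =>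
          let r := countGo dic s fuel child acc.2
          match r.1 with
          | [one, two] => ((acc.1.1 + one, acc.1.2 + two), r.2)
          | _ => (acc.1, r.2))
        (acc, m'))
    = (rest.foldl
        (fun (acc : (Int × Int) × PySem.Dict Int (List Int)) child =>
          let r := countGo dic s fuel child acc.2
          match r.1 with
          | [one, two] => ((acc.1.1 + one, acc.1.2 + two), r.2)
          | _ => (acc.1, r.2))
        ((match (countGo dic s fuel c m').1 with
          | [one, two] => (acc.1 + one, acc.2 + two)
          | _ => acc), (countGo dic s fuel c m').2)) := by
  simp only [List.foldl_cons]
  rcases (countGo dic s fuel c m').1 with _ | ⟨a, _ | ⟨b, _ | ⟨e, t⟩⟩⟩ <;> rfl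

theorem cfoldO_cons_key (dic : PySem.Dict Int (List Int)) (g : Int → Option (List Int))
    (c : Int) (rest : List Int) (acc : Int × Int) (h : (dic.get? c).isSome = true) :
    cfoldO dic g (c :: rest) acc
      = cfoldO dic g rest
          (match g c with
            | some [cw, cb] => (acc.1 + cw, acc.2 + cb)
            | _ => acc) := by
  unfold cfoldO
  simp only [List.foldl_cons, h, if_true]

theorem cfoldO_cons_nonkey (dic : PySem.Dict Int (List Int)) (g : Int → Option (List Int))
    (c : Int) (rest : List Int) (acc : Int × Int) (h : (dic.get? c).isSome = false) :
    cfoldO dic g (c :: rest) acc = cfoldO dic g rest acc := by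
  unfold cfoldO
  simp only [List.foldl_cons, h, Bool.false_eq_true, if_false]

theorem goA_spec (root : Int) (memo dic : List (Int × List Int)) (s : List (Int × String))
    (hA : AcycH root memo dic) :
    ∀ (fuel : Nat) (x : Int) (m : PySem.Dict Int (List Int)),
      x ∈ reachV memo dic root →
      (∀ k, ((PySem.Dict.mk memo).get? k).isSome = true → (m.get? k).isSome = true) →
      (∀ k v, m.get? k = some v → isKeyB dic k = true → k ∈ reachV memo dic root →
        v = VAL memo dic s k) →
      (isKeyB dic x = true → rkV memo dic x ≤ fuel) →
      ((countGo dic s fuel x m).1 = (if isKeyB dic x then VAL memo dic s x else [0, 0]))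
      ∧ (∀ k, ((PySem.Dict.mk memo).get? k).isSome = true →
          (((countGo dic s fuel x m).2).get? k).isSome = true)
      ∧ (∀ k v, ((countGo dic s fuel x m).2).get? k = some v → isKeyB dic k = true →
          k ∈ reachV memo dic root → v = VAL memo dic s k) := by
  intro fuel
  induction fuel with
  | zero =>
    intro x m hx h1 h2 hrk
    have hnx : isKeyB dic x = false := by
      by_contra h
      have hs : isKeyB dic x = true := by
        cases hh : isKeyB dic x
        · exact absurd hh h
        · rfl
      exact absurd (hrk hs) (by have := rkV_pos memo dic x; omega)
    refine ⟨?_, h1, h2⟩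
    simp [countGo, hnx]
  | succ fuel ih =>
    intro x m hx h1 h2 hrk
    cases hdx : PySem.Dict.get? (PySem.Dict.mk dic) x with
    | none =>
      have hnx : isKeyB dic x = false := by unfold isKeyB; simp [hdx]
      refine ⟨?_, ?_, ?_⟩ <;> simp [countGo, hdx, hnx] <;> first | exact h1 | exact h2
    | some cs =>
      have hkx : isKeyB dic x = true := by unfold isKeyB; simp [hdx]
      cases hmx : m.get? x with
      | some v =>
        refine ⟨?_, ?_, ?_⟩ <;> simp [countGo, hdx, hmx, hkx]
        · exact h2 x v hmx hkx hx
        · exact h1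
        · exact h2
      | none =>
        have hxm0 : PySem.Dict.get? (PySem.Dict.mk memo) x = none := by
          cases hh : PySem.Dict.get? (PySem.Dict.mk memo) x with
          | none => rfl
          | some w =>
            have := h1 x (by simp [hh])
            rw [hmx] at this
            simp at this
        have hmiss : missB memo dic x = true := by
          unfold missB
          simp [hkx, hxm0]
        have hcsD : PySem.Dict.getD (PySem.Dict.mk dic) x [] = cs :=
          PySem.Dict.getD_of_get?_eq_some _ [] hdx
        have Hfold : ∀ (cs' : List Int), (∀ c ∈ cs', c ∈ cs) →
            ∀ (acc : Int × Int) (m' : PySem.Dict Int (List Int)),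
              (∀ k, ((PySem.Dict.mk memo).get? k).isSome = true → (m'.get? k).isSome = true) →
              (∀ k v, m'.get? k = some v → isKeyB dic k = true → k ∈ reachV memo dic root →
                v = VAL memo dic s k) →
              ((cs'.foldl
                  (fun (acc : (Int × Int) × PySem.Dict Int (List Int)) child =>
                    let r := countGo dic s fuel child acc.2
                    match r.1 with
                    | [one, two] => ((acc.1.1 + one, acc.1.2 + two), r.2)
                    | _ => (acc.1, r.2))
                  (acc, m')).1 =
                cfoldO (PySem.Dict.mk dic) (fun c => some (VAL memo dic s c)) cs' acc)
              ∧ (∀ k, ((PySem.Dict.mk memo).get? k).isSome = true →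
                  (((cs'.foldl
                      (fun (acc : (Int × Int) × PySem.Dict Int (List Int)) child =>
                        let r := countGo dic s fuel child acc.2
                        match r.1 with
                        | [one, two] => ((acc.1.1 + one, acc.1.2 + two), r.2)
                        | _ => (acc.1, r.2))
                      (acc, m')).2).get? k).isSome = true)
              ∧ (∀ k v, ((cs'.foldl
                      (fun (acc : (Int × Int) × PySem.Dict Int (List Int)) child =>
                        let r := countGo dic s fuel child acc.2
                        match r.1 with
                        | [one, two] => ((acc.1.1 + one, acc.1.2 + two), r.2)
                        | _ => (acc.1, r.2))
                      (acc, m')).2).get? k = some v →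
                  isKeyB dic k = true → k ∈ reachV memo dic root → v = VAL memo dic s k) := by
          intro cs'
          induction cs' with
          | nil => intro _ acc m' hm1 hm2; exact ⟨rfl, hm1, hm2⟩
          | cons c rest ihc =>
            intro hsub acc m' hm1 hm2
            have hcin : c ∈ cs := hsub c (by simp)
            rw [foldA_cons]
            by_cases hkc : isKeyB dic c = true
            · have hc' : c ∈ PySem.Dict.getD (PySem.Dict.mk dic) x [] := by
                rw [hcsD]; exact hcin
              have hlt := rk_child_lt root memo dic hA x c hx hmiss hc' hkc
              have hcv := kid_mem_V root memo dic x c hx hmiss hc' hkc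
              obtain ⟨hv, hmono, hinv⟩ := ih c m' hcv hm1 hm2
                (fun _ => by have := hrk hkx; omega)
              have hval : (countGo dic s fuel c m').1 = VAL memo dic s c := by
                rw [hv, if_pos hkc]
              have hkc' : ((PySem.Dict.mk dic).get? c).isSome = true := hkc
              obtain ⟨hfv, hfm1, hfm2⟩ := ihc (fun d hd => hsub d (by simp [hd]))
                (match VAL memo dic s c with
                  | [cw, cb] => (acc.1 + cw, acc.2 + cb)
                  | _ => acc)
                (countGo dic s fuel c m').2 hmono hinv
              rw [hval]
              refine ⟨?_, ?_, ?_⟩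
              · rw [cfoldO_cons_key (PySem.Dict.mk dic) _ c rest acc hkc', matchSomePair]
                exact hfv
              · exact hfm1
              · exact hfm2
            · have hkcf : isKeyB dic c = false := by
                cases hh : isKeyB dic c
                · rfl
                · exact absurd hh hkc
              have hng := countGo_nonkey dic s fuel c m' hkcf
              have hkc' : ((PySem.Dict.mk dic).get? c).isSome = false := hkcf
              obtain ⟨hfv, hfm1, hfm2⟩ := ihc (fun d hd => hsub d (by simp [hd])) acc m' hm1 hm2
              rw [hng]
              have hacc : ((match ([0, 0] : List Int) with
                | [one, two] => (acc.1 + one, acc.2 + two)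
                | _ => acc) : Int × Int) = acc := by simp
              rw [hacc, cfoldO_cons_nonkey (PySem.Dict.mk dic) _ c rest acc hkc']
              exact ⟨hfv, hfm1, hfm2⟩
        have hr0 : (if ((PySem.Dict.get? (PySem.Dict.mk s) x).getD "" == "W") = true
              then ((1 : Int), (0 : Int)) else ((0 : Int), (1 : Int)))
            = ((if ((PySem.Dict.get? (PySem.Dict.mk s) x).getD "" == "W") = true then (1 : Int) else 0),
                1 - (if ((PySem.Dict.get? (PySem.Dict.mk s) x).getD "" == "W") = true then (1 : Int) else 0)) := by
          by_cases hw : ((PySem.Dict.get? (PySem.Dict.mk s) x).getD "" == "W") = true <;> simp [hw]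
        obtain ⟨hfv, hfm1, hfm2⟩ := Hfold cs (fun c hc => hc)
          (if ((PySem.Dict.get? (PySem.Dict.mk s) x).getD "" == "W") = true
            then ((1 : Int), (0 : Int)) else ((0 : Int), (1 : Int))) m h1 h2
        have hVx := VAL_miss root memo dic s hA x hx cs hdx hxm0
        have hWV : [(cs.foldl
                (fun (acc : (Int × Int) × PySem.Dict Int (List Int)) child =>
                  let r := countGo dic s fuel child acc.2
                  match r.1 with
                  | [one, two] => ((acc.1.1 + one, acc.1.2 + two), r.2)
                  | _ => (acc.1, r.2))
                ((if ((PySem.Dict.get? (PySem.Dict.mk s) x).getD "" == "W") = true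
                  then ((1 : Int), (0 : Int)) else ((0 : Int), (1 : Int))), m)).1.1,
              (cs.foldl
                (fun (acc : (Int × Int) × PySem.Dict Int (List Int)) child =>
                  let r := countGo dic s fuel child acc.2
                  match r.1 with
                  | [one, two] => ((acc.1.1 + one, acc.1.2 + two), r.2)
                  | _ => (acc.1, r.2))
                ((if ((PySem.Dict.get? (PySem.Dict.mk s) x).getD "" == "W") = true
                  then ((1 : Int), (0 : Int)) else ((0 : Int), (1 : Int))), m)).1.2]
            = VAL memo dic s x := by
          rw [hfv, hr0, hVx]
        refine ⟨?_, ?_, ?_⟩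
        · simp only [countGo, hdx, hmx]
          rw [if_pos hkx]
          exact hWV
        · intro k hk
          simp only [countGo, hdx, hmx]
          by_cases hkxeq : k = x
          · subst hkxeq; simp [PySem.Dict.get?_insert_self]
          · rw [PySem.Dict.get?_insert_of_ne _ _ hkxeq]
            exact hfm1 k hk
        · intro k v hkv hkk hkV
          simp only [countGo, hdx, hmx] at hkv
          by_cases hkxeq : k = x
          · subst hkxeq
            rw [PySem.Dict.get?_insert_self] at hkv
            injection hkv with hkv
            rw [← hkv, hWV]
          · rw [PySem.Dict.get?_insert_of_ne _ _ hkxeq] at hkv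
            exact hfm2 k v hkv hkk hkV

-- ===== B-side machinery: the stack machine computes the same values =====

def SS (dic : List (Int × List Int)) : Nat := (dic.map (fun q => q.2.length)).sum

def CC (memo dic : List (Int × List Int)) (x : Int) : Nat := (2 + SS dic) ^ rkV memo dic x

theorem loopB_nil (memo dic : PySem.Dict Int (List Int)) (s : PySem.Dict Int String)
    (f : Nat) (vis : PySem.Set Int) (t : PySem.Dict Int (List Int)) :
    loopB memo dic s f [] vis t = t := by
  cases f <;> rfl

theorem push_children (dic : PySem.Dict Int (List Int)) (l : List Int) (rest : List (Int × Bool)) :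
    l.foldl (fun (st : List (Int × Bool)) c => if (dic.get? c).isSome then (c, false) :: st else st) rest
      = ((l.filter (fun c => (dic.get? c).isSome)).reverse.map (fun c => (c, false))) ++ rest := by
  induction l generalizing rest with
  | nil => simp
  | cons c l ih =>
    by_cases hg : (dic.get? c).isSome = true
    · simp [hg, ih]
    · simp [hg, ih]

theorem cs_len_le_SS (dic : List (Int × List Int)) (x : Int) (cs : List Int)
    (h : (x, cs) ∈ dic) : cs.length ≤ SS dic := by
  unfold SS
  exact List.single_le_sum (by simp) _ (List.mem_map_of_mem h)

theorem CC_pos (memo dic : List (Int × List Int)) (x : Int) : 1 ≤ CC memo dic x :=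
  Nat.one_le_pow _ _ (by omega)

theorem enter_spec (root : Int) (dic : List (Int × List Int)) (s : List (Int × String))
    (memo0 : List (Int × List Int)) (hA : AcycH root memo0 dic) :
    ∀ (r : Nat) (x : Int),
      isKeyB dic x = true → x ∈ reachV memo0 dic root → rkV memo0 dic x ≤ r →
      ∀ (rest : List (Int × Bool)) (vis : PySem.Set Int) (t : PySem.Dict Int (List Int)) (fuel : Nat),
        (∀ a b, t.get? a = some b → b = VAL memo0 dic s a) →
        (∀ a, a ∈ vis → isKeyB dic a = true → t.get? a = none →
          rkV memo0 dic x < rkV memo0 dic a) →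
        CC memo0 dic x ≤ fuel →
        ∃ (k : Nat) (vis' : PySem.Set Int) (t' : PySem.Dict Int (List Int)),
          loopB (PySem.Dict.mk memo0) (PySem.Dict.mk dic) (PySem.Dict.mk s) fuel ((x, false) :: rest) vis t
            = loopB (PySem.Dict.mk memo0) (PySem.Dict.mk dic) (PySem.Dict.mk s) (fuel - k) rest vis' t'
          ∧ 1 ≤ k ∧ k ≤ CC memo0 dic x
          ∧ (∀ a b, t.get? a = some b → t'.get? a = some b)
          ∧ (∀ a b, t'.get? a = some b → b = VAL memo0 dic s a)
          ∧ (∀ a, a ∈ vis → a ∈ vis')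
          ∧ (∀ a, a ∈ vis' → isKeyB dic a = true → t'.get? a = none → a ∈ vis ∧ t.get? a = none)
          ∧ (t'.get? x).isSome = true := by
  intro r
  induction r with
  | zero =>
    intro x _ _ hr
    exact absurd (rkV_pos memo0 dic x) (by omega)
  | succ r ih =>
    intro x hkx hx hrx rest vis t fuel hSound hProg hfuel
    obtain ⟨cs, hcs⟩ := Option.isSome_iff_exists.mp hkx
    have hrank1 : 1 ≤ rkV memo0 dic x := rkV_pos memo0 dic x
    have hCCpos : 1 ≤ CC memo0 dic x := CC_pos memo0 dic x
    obtain ⟨f, rfl⟩ : ∃ f, fuel = f + 1 := ⟨fuel - 1, by omega⟩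
    by_cases hv : x ∈ vis
    · have hvb : PySem.Set.contains vis x = true := by simpa [PySem.Set.contains] using hv
      have hts : (t.get? x).isSome = true := by
        cases ht : t.get? x with
        | some _ => rfl
        | none => exact absurd (hProg x hv hkx ht) (by omega)
      exact ⟨1, vis, t, by simp [loopB, hv], le_refl 1, hCCpos, fun a b h => h, hSound,
        fun a h => h, fun a ha hd hn => ⟨ha, hn⟩, hts⟩
    · have hvb : PySem.Set.contains vis x = false := by
        simp [PySem.Set.contains]
        exact hv
      by_cases hm : ((PySem.Dict.mk memo0).get? x).isSome = true
      · -- memo hit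
        obtain ⟨w, hw⟩ := Option.isSome_iff_exists.mp hm
        have hVx : VAL memo0 dic s x = w := VAL_memoHit memo0 dic s x hkx w hw
        have hgD : PySem.Dict.getD (PySem.Dict.mk memo0) x [] = w :=
          PySem.Dict.getD_of_get?_eq_some _ [] hw
        refine ⟨1, PySem.Set.add vis x, t.insert x ((PySem.Dict.mk memo0).getD x []),
          by simp [loopB, hv, hm], le_refl 1, hCCpos, ?_, ?_, ?_, ?_, ?_⟩
        · intro a b h
          by_cases hax : a = x
          · subst hax
            have hb : b = VAL memo0 dic s a := hSound a b h
            rw [PySem.Dict.get?_insert_self, hgD, hb, hVx]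
          · rw [PySem.Dict.get?_insert_of_ne _ _ hax]
            exact h
        · intro a b h
          by_cases hax : a = x
          · subst hax
            rw [PySem.Dict.get?_insert_self] at h
            injection h with h
            rw [← h, hgD, hVx]
          · rw [PySem.Dict.get?_insert_of_ne _ _ hax] at h
            exact hSound a b h
        · intro a ha
          exact (PySem.Set.mem_add vis x a).mpr (Or.inl ha)
        · intro a ha hd hn
          by_cases hax : a = x
          · subst hax
            rw [PySem.Dict.get?_insert_self] at hn
            exact absurd hn (by simp)
          · rw [PySem.Dict.get?_insert_of_ne _ _ hax] at hn
            rcases (PySem.Set.mem_add vis x a).mp ha with h | h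
            · exact ⟨h, hn⟩
            · exact absurd h hax
        · simp [PySem.Dict.get?_insert_self]
      · -- expand: push the ready frame and the children
        have hm' : ((PySem.Dict.mk memo0).get? x).isSome = false := by simpa using hm
        have hm0 : PySem.Dict.get? (PySem.Dict.mk memo0) x = none :=
          Option.not_isSome_iff_eq_none.mp (by simp [hm'])
        have hmiss : missB memo0 dic x = true := by
          unfold missB
          simp [hkx, hm0]
        have hgetD : PySem.Dict.getD (PySem.Dict.mk dic) x [] = cs :=
          PySem.Dict.getD_of_get?_eq_some _ [] hcs
        have hxmem : (x, cs) ∈ dic := by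
          simpa [PySem.Dict.mk] using PySem.Dict.mem_items_of_get?_eq_some (PySem.Dict.mk dic) hcs
        have CH : ∀ (clist : List Int),
            (∀ c ∈ clist, isKeyB dic c = true ∧ c ∈ reachV memo0 dic root
              ∧ rkV memo0 dic c < rkV memo0 dic x) →
            ∀ (rest' : List (Int × Bool)) (vis₀ : PySem.Set Int) (t₀ : PySem.Dict Int (List Int)) (fuel₀ : Nat),
              (∀ a b, t₀.get? a = some b → b = VAL memo0 dic s a) →
              (∀ a, a ∈ vis₀ → isKeyB dic a = true → t₀.get? a = none →
                rkV memo0 dic x ≤ rkV memo0 dic a) →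
              (clist.map (CC memo0 dic)).sum ≤ fuel₀ →
              ∃ (k : Nat) (vis₁ : PySem.Set Int) (t₁ : PySem.Dict Int (List Int)),
                loopB (PySem.Dict.mk memo0) (PySem.Dict.mk dic) (PySem.Dict.mk s) fuel₀
                    ((clist.map (fun c => (c, false))) ++ rest') vis₀ t₀
                  = loopB (PySem.Dict.mk memo0) (PySem.Dict.mk dic) (PySem.Dict.mk s) (fuel₀ - k) rest' vis₁ t₁
                ∧ k ≤ (clist.map (CC memo0 dic)).sum
                ∧ (∀ a b, t₀.get? a = some b → t₁.get? a = some b)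
                ∧ (∀ a b, t₁.get? a = some b → b = VAL memo0 dic s a)
                ∧ (∀ a, a ∈ vis₀ → a ∈ vis₁)
                ∧ (∀ a, a ∈ vis₁ → isKeyB dic a = true → t₁.get? a = none →
                    a ∈ vis₀ ∧ t₀.get? a = none)
                ∧ (∀ c ∈ clist, (t₁.get? c).isSome = true) := by
          intro clist
          induction clist with
          | nil =>
            intro _ rest' vis₀ t₀ fuel₀ hS0 hP0 _
            exact ⟨0, vis₀, t₀, by simp, by simp, fun a b h => h, hS0, fun a h => h,
              fun a h hd hn => ⟨h, hn⟩, by simp⟩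
          | cons c cl ihc =>
            intro hall rest' vis₀ t₀ fuel₀ hS0 hP0 hf0
            obtain ⟨hcdic, hcV, hcrank⟩ := hall c (by simp)
            have hsum : ((c :: cl).map (CC memo0 dic)).sum = CC memo0 dic c + (cl.map (CC memo0 dic)).sum := by simp
            have hfc : CC memo0 dic c ≤ fuel₀ := by omega
            obtain ⟨k₁, vis₁, t₁, heq1, hk1low, hk1, hmono1, hS1, hv1, hnp1, hsome1⟩ :=
              ih c hcdic hcV (by omega) ((cl.map (fun c => (c, false))) ++ rest') vis₀ t₀ fuel₀ hS0
                (fun a ha hd hn => lt_of_lt_of_le hcrank (hP0 a ha hd hn)) hfc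
            obtain ⟨k₂, vis₂, t₂, heq2, hk2, hmono2, hS2, hv2, hnp2, hsome2⟩ :=
              ihc (fun d hd => hall d (by simp [hd])) rest' vis₁ t₁ (fuel₀ - k₁) hS1
                (fun a ha hd hn => by
                  obtain ⟨ha0, hn0⟩ := hnp1 a ha hd hn
                  exact hP0 a ha0 hd hn0)
                (by omega)
            refine ⟨k₁ + k₂, vis₂, t₂, ?_, by omega, ?_, hS2, ?_, ?_, ?_⟩
            · have hshape : ((c :: cl).map (fun c => (c, false))) ++ rest'
                  = (c, false) :: ((cl.map (fun c => (c, false))) ++ rest') := by simp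
              rw [hshape, heq1, heq2, Nat.sub_sub]
            · exact fun a b h => hmono2 a b (hmono1 a b h)
            · exact fun a ha => hv2 a (hv1 a ha)
            · intro a ha hd hn
              obtain ⟨ha1, hn1⟩ := hnp2 a ha hd hn
              exact hnp1 a ha1 hd hn1
            · intro d hd
              rcases List.mem_cons.mp hd with h | h
              · subst h
                obtain ⟨w, hw⟩ := Option.isSome_iff_exists.mp hsome1
                rw [hmono2 d w hw]
                rfl
              · exact hsome2 d h
        have hstack : cs.foldl
              (fun (st : List (Int × Bool)) c =>
                if ((PySem.Dict.mk dic).get? c).isSome then (c, false) :: st else st)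
              ((x, true) :: rest)
            = (((cs.filter (fun c => ((PySem.Dict.mk dic).get? c).isSome)).reverse).map (fun c => (c, false)))
                ++ (x, true) :: rest :=
          push_children (PySem.Dict.mk dic) cs ((x, true) :: rest)
        have hallcl : ∀ c ∈ (cs.filter (fun c => ((PySem.Dict.mk dic).get? c).isSome)).reverse,
            isKeyB dic c = true ∧ c ∈ reachV memo0 dic root
              ∧ rkV memo0 dic c < rkV memo0 dic x := by
          intro c hc
          rw [List.mem_reverse, List.mem_filter] at hc
          have hck : isKeyB dic c = true := by simpa [isKeyB] using hc.2
          have hc' : c ∈ PySem.Dict.getD (PySem.Dict.mk dic) x [] := by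
            rw [hgetD]; exact hc.1
          exact ⟨hck, kid_mem_V root memo0 dic x c hx hmiss hc' hck,
            rk_child_lt root memo0 dic hA x c hx hmiss hc' hck⟩
        have hlenle : ((cs.filter (fun c => ((PySem.Dict.mk dic).get? c).isSome)).reverse).length ≤ SS dic := by
          rw [List.length_reverse]
          exact le_trans (List.length_filter_le _ _) (cs_len_le_SS dic x cs hxmem)
        have heach : ∀ n ∈ ((cs.filter (fun c => ((PySem.Dict.mk dic).get? c).isSome)).reverse).map (CC memo0 dic),
            n ≤ (2 + SS dic) ^ (rkV memo0 dic x - 1) := by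
          intro n hn
          obtain ⟨c, hc, rfl⟩ := List.mem_map.mp hn
          have := (hallcl c hc).2.2
          exact Nat.pow_le_pow_right (by omega) (by omega)
        have hsumle : ((((cs.filter (fun c => ((PySem.Dict.mk dic).get? c).isSome)).reverse).map (CC memo0 dic)).sum)
            ≤ SS dic * (2 + SS dic) ^ (rkV memo0 dic x - 1) := by
          calc ((((cs.filter (fun c => ((PySem.Dict.mk dic).get? c).isSome)).reverse).map (CC memo0 dic)).sum)
              ≤ (((cs.filter (fun c => ((PySem.Dict.mk dic).get? c).isSome)).reverse).map (CC memo0 dic)).length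
                  * (2 + SS dic) ^ (rkV memo0 dic x - 1) :=
                List.sum_le_card_nsmul _ _ heach
            _ ≤ SS dic * (2 + SS dic) ^ (rkV memo0 dic x - 1) := by
                apply Nat.mul_le_mul_right
                simpa using hlenle
        have hCCx : CC memo0 dic x = (2 + SS dic) ^ (rkV memo0 dic x - 1) * (2 + SS dic) := by
          rw [CC, ← pow_succ]
          congr 1
          omega
        have hpow1 : 1 ≤ (2 + SS dic) ^ (rkV memo0 dic x - 1) := Nat.one_le_pow _ _ (by omega)
        have hbound : ((((cs.filter (fun c => ((PySem.Dict.mk dic).get? c).isSome)).reverse).map (CC memo0 dic)).sum) + 2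
            ≤ CC memo0 dic x := by
          rw [hCCx, Nat.mul_add]
          nlinarith [hsumle, hpow1]
        obtain ⟨k₁, vis₂, t₂, heqC, hk1, hmonoC, hS2, hvis2, hnp2, hsome2⟩ :=
          CH ((cs.filter (fun c => ((PySem.Dict.mk dic).get? c).isSome)).reverse) hallcl
            ((x, true) :: rest) (PySem.Set.add vis x) t f hSound
            (fun a ha hd hn => by
              rcases (PySem.Set.mem_add vis x a).mp ha with h | h
              · exact le_of_lt (hProg a h hd hn)
              · subst h; exact le_refl _)
            (by omega)
        obtain ⟨g, hg⟩ : ∃ g, f - k₁ = g + 1 := ⟨f - k₁ - 1, by omega⟩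
        have hfold2 : cfoldO (PySem.Dict.mk dic) (fun c => t₂.get? c) cs
              ((if ((PySem.Dict.get? (PySem.Dict.mk s) x).getD "" == "W") = true then (1 : Int) else 0),
                1 - (if ((PySem.Dict.get? (PySem.Dict.mk s) x).getD "" == "W") = true then (1 : Int) else 0))
            = cfoldO (PySem.Dict.mk dic) (fun c => some (VAL memo0 dic s c)) cs
              ((if ((PySem.Dict.get? (PySem.Dict.mk s) x).getD "" == "W") = true then (1 : Int) else 0),
                1 - (if ((PySem.Dict.get? (PySem.Dict.mk s) x).getD "" == "W") = true then (1 : Int) else 0)) := by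
          apply cfoldO_congr
          intro c hc hck
          have hcl : c ∈ (cs.filter (fun c => ((PySem.Dict.mk dic).get? c).isSome)).reverse := by
            rw [List.mem_reverse, List.mem_filter]
            exact ⟨hc, by simpa using hck⟩
          obtain ⟨w, hw⟩ := Option.isSome_iff_exists.mp (hsome2 c hcl)
          rw [hw, hS2 c w hw]
        have hVx := VAL_miss root memo0 dic s hA x hx cs hcs hm0
        have hready : loopB (PySem.Dict.mk memo0) (PySem.Dict.mk dic) (PySem.Dict.mk s) (g + 1)
              ((x, true) :: rest) vis₂ t₂
            = loopB (PySem.Dict.mk memo0) (PySem.Dict.mk dic) (PySem.Dict.mk s) g rest vis₂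
                (t₂.insert x (VAL memo0 dic s x)) := by
          have hfr : ((PySem.Dict.getD (PySem.Dict.mk dic) x []).foldl
                (fun (acc : Int × Int) c =>
                  if (((PySem.Dict.mk dic).get? c)).isSome then
                    match t₂.get? c with
                    | some [cw, cb] => (acc.1 + cw, acc.2 + cb)
                    | _ => acc
                  else acc)
                ((if ((PySem.Dict.get? (PySem.Dict.mk s) x).getD "" == "W") = true then (1 : Int) else 0),
                  1 - (if ((PySem.Dict.get? (PySem.Dict.mk s) x).getD "" == "W") = true then (1 : Int) else 0)))
              = cfoldO (PySem.Dict.mk dic) (fun c => t₂.get? c) cs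
                ((if ((PySem.Dict.get? (PySem.Dict.mk s) x).getD "" == "W") = true then (1 : Int) else 0),
                  1 - (if ((PySem.Dict.get? (PySem.Dict.mk s) x).getD "" == "W") = true then (1 : Int) else 0)) := by
            rw [hgetD]
            rfl
          have hlist : VAL memo0 dic s x
              = [(cfoldO (PySem.Dict.mk dic) (fun c => t₂.get? c) cs
                  ((if ((PySem.Dict.get? (PySem.Dict.mk s) x).getD "" == "W") = true then (1 : Int) else 0),
                    1 - (if ((PySem.Dict.get? (PySem.Dict.mk s) x).getD "" == "W") = true then (1 : Int) else 0))).1,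
                (cfoldO (PySem.Dict.mk dic) (fun c => t₂.get? c) cs
                  ((if ((PySem.Dict.get? (PySem.Dict.mk s) x).getD "" == "W") = true then (1 : Int) else 0),
                    1 - (if ((PySem.Dict.get? (PySem.Dict.mk s) x).getD "" == "W") = true then (1 : Int) else 0))).2] := by
            rw [hfold2]
            exact hVx
          simp only [loopB, Bool.true_eq_false, if_false]
          rw [hfr]
          rw [← hlist]
        refine ⟨k₁ + 2, vis₂, t₂.insert x (VAL memo0 dic s x), ?_, by omega, by omega, ?_, ?_, ?_, ?_, ?_⟩
        · have hstep1 : loopB (PySem.Dict.mk memo0) (PySem.Dict.mk dic) (PySem.Dict.mk s) (f + 1)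
                ((x, false) :: rest) vis t
              = loopB (PySem.Dict.mk memo0) (PySem.Dict.mk dic) (PySem.Dict.mk s) f
                  ((((cs.filter (fun c => ((PySem.Dict.mk dic).get? c).isSome)).reverse).map (fun c => (c, false)))
                    ++ (x, true) :: rest)
                  (PySem.Set.add vis x) t := by
            simp only [loopB, hvb, Bool.false_eq_true, if_false, hm', hgetD, if_true]
            rw [hstack]
          rw [hstep1, heqC, hg, hready]
          congr 1
          omega
        · intro a b h
          by_cases hax : a = x
          · subst hax
            have hb : b = VAL memo0 dic s a := hSound a b h
            rw [PySem.Dict.get?_insert_self, hb]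
          · rw [PySem.Dict.get?_insert_of_ne _ _ hax]
            exact hmonoC a b h
        · intro a b h
          by_cases hax : a = x
          · subst hax
            rw [PySem.Dict.get?_insert_self] at h
            injection h with h
            rw [← h]
          · rw [PySem.Dict.get?_insert_of_ne _ _ hax] at h
            exact hS2 a b h
        · intro a ha
          exact hvis2 a ((PySem.Set.mem_add vis x a).mpr (Or.inl ha))
        · intro a ha hd hn
          by_cases hax : a = x
          · subst hax
            rw [PySem.Dict.get?_insert_self] at hn
            exact absurd hn (by simp)
          · rw [PySem.Dict.get?_insert_of_ne _ _ hax] at hn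
            obtain ⟨ha2, hn2⟩ := hnp2 a ha hd hn
            rcases (PySem.Set.mem_add vis x a).mp ha2 with h | h
            · exact ⟨h, hn2⟩
            · exact absurd h hax
        · simp [PySem.Dict.get?_insert_self]

-- ===== VERDICT (by name: the statement is the Claim_ definition above) =====
theorem count_spec : Claim_equal_count := by
  intro root memo dic s _ hPre
  unfold Spec_count count count_alt
  cases hdx : PySem.Dict.get? (PySem.Dict.mk dic) root with
  | none => simp [countGo, hdx]
  | some cs =>
    have hA : AcycH root memo dic := fun x hx hm c hc hk => ((hPre x hx hm).2 c hc hk).2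
    have hroot : isKeyB dic root = true := by unfold isKeyB; simp [hdx]
    have hrV : root ∈ reachV memo dic root := mem_reachV_self memo dic root
    have hInv2 : ∀ (k : Int) (v : List Int), (PySem.Dict.mk memo).get? k = some v →
        isKeyB dic k = true → k ∈ reachV memo dic root → v = VAL memo dic s k := by
      intro k v hkv hkk _
      exact (VAL_memoHit memo dic s k hkk v hkv).symm
    have hmain := (goA_spec root memo dic s hA (dic.length + 1) root (PySem.Dict.mk memo)
      hrV (fun _ hk => hk) hInv2 (fun _ => rkV_le memo dic root)).1
    rw [hmain, if_pos hroot, if_neg (by simp [hdx])]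
    have hfuel : CC memo dic root ≤ (2 + (dic.map (fun q => q.2.length)).sum) ^ (dic.length + 1) := by
      unfold CC SS
      exact Nat.pow_le_pow_right (by omega) (rkV_le memo dic root)
    obtain ⟨k, vis', t', heq, _, _, _, hSnd, _, _, hsome⟩ :=
      enter_spec root dic s memo hA (rkV memo dic root) root hroot hrV (le_refl _) []
        PySem.Set.empty PySem.Dict.empty
        ((2 + (dic.map (fun q => q.2.length)).sum) ^ (dic.length + 1))
        (fun a b h => by simp [PySem.Dict.get?_empty] at h)
        (fun a ha => by simp [PySem.Set.empty] at ha)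
        hfuel
    rw [heq, loopB_nil]
    obtain ⟨v, hv⟩ := Option.isSome_iff_exists.mp hsome
    rw [PySem.Dict.getD_of_get?_eq_some _ [] hv, hSnd root v hv]
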